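-- pv_equiv track=rewrite | github.com/quarterback/viperball | ui/page_modules/section_play.py | _build_conference_team_map
-- ===== SOURCE A (Python) =====
-- def _build_conference_team_map(teams):
--     conf_map = {}
--     for t in teams:
--         conf = t.get("conference", "Independent")
--         conf_map.setdefault(conf, []).append(t)
--     for conf in conf_map:
--         conf_map[conf].sort(key=lambda x: x["name"])
--     return conf_map
-- ===== SOURCE B (Python) =====
-- def _build_conference_team_map(teams):
--     confs = []
--     for t in teams:
--         c = t.get("conference", "Independent")
--         if c not in confs:
--             confs.append(c)
--     return {
--         c: sorted((t for t in teams if t.get("conference", "Independent") == c),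
--                   key=lambda x: x["name"])
--         for c in confs
--     }
-- ===== Notes on version B (the rewrite author's own statement) =====
-- stated objective: alternative
-- what changed: A incrementally builds dict buckets with setdefault/append and then sorts each bucket in place; B never mutates buckets: it collects the distinct conference names in first-occurrence order and builds the result as a comprehension that, per conference, filters the team list and sorts that slice by name.
import Mathlib
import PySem

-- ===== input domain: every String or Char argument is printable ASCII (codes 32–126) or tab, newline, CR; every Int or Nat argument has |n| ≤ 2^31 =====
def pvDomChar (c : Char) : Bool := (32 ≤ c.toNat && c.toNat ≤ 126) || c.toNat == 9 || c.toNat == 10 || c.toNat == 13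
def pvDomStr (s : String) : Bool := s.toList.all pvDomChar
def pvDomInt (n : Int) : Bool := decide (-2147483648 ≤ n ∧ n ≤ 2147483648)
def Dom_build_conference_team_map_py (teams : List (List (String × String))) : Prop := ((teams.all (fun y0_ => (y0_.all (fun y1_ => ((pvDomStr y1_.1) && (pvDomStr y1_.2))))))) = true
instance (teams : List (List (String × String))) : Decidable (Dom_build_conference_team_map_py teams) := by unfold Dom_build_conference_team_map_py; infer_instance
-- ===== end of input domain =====

-- B replaces A's incremental dict-of-buckets (setdefault/append, then in-place per-bucket
-- sorts) by a comprehension: distinct conferences in first-occurrence order, each paired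
-- with the name-sorted filter of the team list (same return value).

abbrev pvTeam : Type := List (String × String)

-- shared accessors: t.get("conference", "Independent") and the sort key x["name"]
-- (the ports read the name with getD ""; Pre_ guarantees every team has a "name" key,
--  which is exactly where Python would raise KeyError, so the default is never used)
def pvConfOf (t : pvTeam) : String := PySem.Dict.getD ⟨t⟩ "conference" "Independent"
def pvNameOf (t : pvTeam) : String := PySem.Dict.getD ⟨t⟩ "name" ""

-- ===== PORT A =====
-- conf_map.setdefault(conf, []).append(t)  ==  conf_map[conf] = conf_map.get(conf, []) + [t]  ==  Dict.modify;
-- the final 'for conf in conf_map: conf_map[conf].sort(key=...)' sorts each value in place (keys untouched)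
def build_conference_team_map_py (teams : List pvTeam) : List (String × List pvTeam) :=
  let conf_map : PySem.Dict String (List pvTeam) :=
    teams.foldl (fun d t => d.modify (pvConfOf t) [] (fun v => v ++ [t])) PySem.Dict.empty
  conf_map.items.map (fun kv => (kv.1, PySem.List.sorted kv.2 pvNameOf))

-- ===== PORT B =====
-- 'if c not in confs: confs.append(c)' is exactly PySem.Set.add on the accumulator
def build_conference_team_map_py_alt (teams : List pvTeam) : List (String × List pvTeam) :=
  let confs : PySem.Set String :=
    teams.foldl (fun acc t => PySem.Set.add acc (pvConfOf t)) PySem.Set.empty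
  confs.map (fun c =>
    (c, PySem.List.sorted (teams.filter (fun t => pvConfOf t == c)) pvNameOf))

-- ===== PRECONDITION & SPEC =====
-- Pre_: every team carries a "name" key — exactly where Python's sort key x["name"] raises KeyError (in A and in B alike)
def Pre_build_conference_team_map_py (teams : List pvTeam) : Prop :=
  ∀ t ∈ teams, (PySem.Dict.get? (⟨t⟩ : PySem.Dict String String) "name").isSome = true
instance (teams : List (List (String × String))) : Decidable (Pre_build_conference_team_map_py teams) := by unfold Pre_build_conference_team_map_py; infer_instance
def pvWitness_build_conference_team_map_py : (List (List (String × String))) :=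
  [[("name", "B"), ("conference", "X")], [("name", "A")]]

def Spec_build_conference_team_map_py (teams : List (List (String × String))) (out : List (String × List (List (String × String)))) : Prop := out = build_conference_team_map_py_alt teams
instance (teams : List (List (String × String))) (out : List (String × List (List (String × String)))) : Decidable (Spec_build_conference_team_map_py teams out) := by unfold Spec_build_conference_team_map_py; infer_instance

-- ===== CLAIM (what is proved, stated in full; the proofs are below) =====
def Claim_equal_build_conference_team_map_py : Prop := ∀ (teams : List (List (String × String))), Dom_build_conference_team_map_py teams → Pre_build_conference_team_map_py teams → Spec_build_conference_team_map_py teams (build_conference_team_map_py teams)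

-- ===== LEMMAS AND PROOFS =====

-- the first-occurrence list of conference names: A's key order and B's confs list
def pvConfs (teams : List pvTeam) : List String := PySem.Set.ofList (teams.map pvConfOf)

-- A's grouping loop builds exactly: first-occurrence conference keys, each mapped to its subsequence of teams
lemma pv_bucket_fold_items (teams : List pvTeam) :
    (teams.foldl (fun d t => d.modify (pvConfOf t) [] (fun v => v ++ [t])) (PySem.Dict.empty : PySem.Dict String (List pvTeam))).items
      = (pvConfs teams).map (fun c => (c, teams.filter (fun t => pvConfOf t == c))) := by
  have hkeys : (teams.foldl (fun d t => d.modify (pvConfOf t) [] (fun v => v ++ [t])) (PySem.Dict.empty : PySem.Dict String (List pvTeam))).keys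
      = pvConfs teams := by
    rw [PySem.Dict.keys_foldl_modify_key (f := fun _ t v => v ++ [t])]
    simp [PySem.Dict.empty, PySem.Dict.keys, PySem.Set.update, PySem.Set.ofList_eq_foldl, pvConfs]
  have hnd : (teams.foldl (fun d t => d.modify (pvConfOf t) [] (fun v => v ++ [t])) (PySem.Dict.empty : PySem.Dict String (List pvTeam))).keys.Nodup := by
    rw [hkeys]; exact PySem.Set.nodup_ofList _
  rw [PySem.Dict.items_eq_map_keys _ hnd [], hkeys]
  refine List.map_congr_left (fun c _ => ?_)
  have hfold : (teams.foldl (fun d t => d.modify (pvConfOf t) [] (fun v => v ++ [t])) (PySem.Dict.empty : PySem.Dict String (List pvTeam)))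
      = ((teams.map (fun t => (pvConfOf t, t))).foldl (fun d p => d.modify p.1 [] (fun v => v ++ [p.2])) PySem.Dict.empty) := by
    rw [List.foldl_map]
  rw [hfold, PySem.Dict.getD_foldl_modify_append]
  simp [List.filter_map, Function.comp_def]

-- B's conference loop is set(…) in first-occurrence order
lemma pv_confs_fold (teams : List pvTeam) :
    teams.foldl (fun acc t => PySem.Set.add acc (pvConfOf t)) PySem.Set.empty = pvConfs teams := by
  rw [pvConfs, PySem.Set.ofList_eq_foldl, List.foldl_map]; rfl

-- ===== VERDICT (by name: the statement is the Claim_ definition above) =====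
theorem build_conference_team_map_py_spec : Claim_equal_build_conference_team_map_py := by
  intro teams _ _
  unfold Spec_build_conference_team_map_py build_conference_team_map_py build_conference_team_map_py_alt
  simp only [pv_bucket_fold_items, pv_confs_fold, List.map_map]
  rfl
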